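-- pv_equiv track=rewrite | github.com/Jedar/PITG | src/baseline/das/das.py | substring_movement
-- ===== SOURCE A (Python) =====
-- import itertools
--
-- def split_string_by_type(string):
--     result = []
--     current_type = None
--     current_word = ''
--
--     for char in string:
--         if char.isupper():
--             new_type = 'upper'
--         elif char.islower():
--             new_type = 'lower'
--         elif char.isdigit():
--             new_type = 'digit'
--         else:
--             new_type = 'special'
--
--         if new_type != current_type:
--             if current_word:
--                 result.append(current_word)
--             current_type = new_type
--             current_word = ''
--
--         current_word += char
--
--     if current_word:
--         result.append(current_word)
--
--     return result
--
-- def substring_movement(pwds):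
--     groups = split_string_by_type(pwds[0])
--     group_permutations = itertools.permutations(groups)
--
--     cnt = 0
--     for permutation in group_permutations:
--         new_string = "".join(permutation)
--         cnt += 1
--         if cnt > 10:
--             break
--         yield new_string
-- ===== SOURCE B (Python) =====
-- def _cls(c):
--     if c.isupper():
--         return 0
--     if c.islower():
--         return 1
--     if c.isdigit():
--         return 2
--     return 3
--
--
-- def _runs(s):
--     # recursive decomposition: peel the longest same-class prefix, recurse on the rest
--     if not s:
--         return []
--     i = 1
--     while i < len(s) and _cls(s[i]) == _cls(s[0]):
--         i += 1
--     return [s[:i]] + _runs(s[i:])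
--
--
-- def substring_movement(pwds):
--     groups = _runs(pwds[0])
--     total = 1
--     for k in range(2, len(groups) + 1):
--         total *= k
--     # build each of the first min(10, n!) permutations directly by factorial-base
--     # unranking instead of enumerating itertools.permutations
--     for rank in range(min(10, total)):
--         pool = list(groups)
--         r = rank
--         word = ''
--         f = total
--         while pool:
--             f //= len(pool)
--             i, r = divmod(r, f)
--             word += pool.pop(i)
--         yield word
-- ===== Notes on version B (the rewrite author's own statement) =====
-- stated objective: alternative
-- what changed: B splits the password into class runs by recursive longest-prefix peeling instead of A's per-character accumulator state machine, and builds each of the first min(10, n!) permutations directly by factorial-base unranking (repeated divmod by a shrinking factorial plus pool.pop) instead of lazily enumerating itertools.permutations with a counter-and-break loop.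
import Mathlib
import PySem

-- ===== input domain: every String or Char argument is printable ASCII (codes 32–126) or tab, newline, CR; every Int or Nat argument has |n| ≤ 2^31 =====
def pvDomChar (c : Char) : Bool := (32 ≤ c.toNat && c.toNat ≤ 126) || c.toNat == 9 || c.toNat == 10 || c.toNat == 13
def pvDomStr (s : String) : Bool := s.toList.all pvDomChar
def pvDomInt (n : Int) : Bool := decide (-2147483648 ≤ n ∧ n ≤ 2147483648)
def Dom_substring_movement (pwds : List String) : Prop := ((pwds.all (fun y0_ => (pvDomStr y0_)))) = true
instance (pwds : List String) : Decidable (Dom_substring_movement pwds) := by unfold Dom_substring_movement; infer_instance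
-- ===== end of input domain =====

-- B splits the password into class runs by recursive longest-prefix peeling instead of A's
-- character-by-character accumulator state machine, and constructs each of the first
-- min(10, n!) permutations directly by factorial-base unranking (divmod with a shrinking
-- factorial and pop) instead of enumerating itertools.permutations with a counter-and-break
-- loop (alternative algorithm, same cost). Both programs are generators; we model the list
-- of yielded values.

-- character class with the precedence upper → lower → digit → special (both Pythons test
-- the classes in this order: A inline, B in _cls)
def pyClassify (c : Char) : Nat :=
  if PySem.Chars.isupper c then 0
  else if PySem.Chars.islower c then 1
  else if PySem.Chars.isdigit c then 2
  else 3

-- ===== PORT A =====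
-- one iteration of A's for-loop over the characters: state (result, current_type, current_word)
def dasStep (st : List (List Char) × Option Nat × List Char) (c : Char) :
    List (List Char) × Option Nat × List Char :=
  let nt := pyClassify c
  let st' := if some nt ≠ st.2.1 then
      ((if st.2.2 ≠ [] then st.1 ++ [st.2.2] else st.1), some nt, ([] : List Char))
    else st
  (st'.1, st'.2.1, st'.2.2 ++ [c])

def split_string_by_type (s : String) : List String :=
  let st := s.toList.foldl dasStep ([], none, [])
  (if st.2.2 ≠ [] then st.1 ++ [st.2.2] else st.1).map String.ofList

-- itertools.permutations(xs) consumed lazily: the first k permutations in itertools order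
-- (fuel = xs.length; only as many sub-permutations as the budget k asks for are built)
def permsTakeAux {α : Type} [Inhabited α] : Nat → Nat → List α → List (List α)
  | _, 0, _ => []
  | 0, _+1, _ => [[]]
  | fuel+1, k+1, xs =>
    (List.range xs.length).foldl
      (fun acc i =>
        if k+1 ≤ acc.length then acc
        else acc ++ (permsTakeAux fuel (k+1 - acc.length) (xs.take i ++ xs.drop (i+1))).map
               (fun p => xs.getD i default :: p)) []

def substring_movement (pwds : List String) : List String :=
  match PySem.List.pyGet? pwds 0 with
  | none => []   -- pwds[0] raises IndexError: excluded by Pre_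
  | some s =>
    let groups := split_string_by_type s
    let perms := permsTakeAux groups.length 11 groups
    (perms.foldl (fun (st : Nat × List String) p =>
        let ns := PySem.Str.join "" p
        let cnt := st.1 + 1
        if cnt > 10 then (cnt, st.2) else (cnt, st.2 ++ [ns])) (0, [])).2

-- ===== PORT B =====
-- _runs: peel the longest prefix of the first character's class (B's while loop computes
-- exactly the length of that prefix), recurse on the rest
def runsB (l : List Char) : List (List Char) :=
  match l with
  | [] => []
  | c :: cs =>
    let i := 1 + (cs.takeWhile (fun d => pyClassify d == pyClassify c)).length
    ((c :: cs).take i) :: runsB ((c :: cs).drop i)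
termination_by l.length
decreasing_by
  simp only [List.length_drop, List.length_cons]
  omega

-- B's inner while loop: state (pool, r, word, f); fuel = the initial pool length (the loop
-- runs exactly len(pool) times).  '//'  and divmod on these nonnegative ints are Nat
-- division/mod; pool.pop(i) = (pool[i], pool without index i), exact for the in-range i
-- this loop produces (i = r // f < len(pool) whenever r < f * len(pool)).
def unrankLoop : Nat → List String → Nat → String → Nat → String
  | 0, _, _, w, _ => w
  | fuel+1, pool, r, w, f =>
    match pool with
    | [] => w
    | _ :: _ =>
      let f' := f / pool.length
      let i := r / f'
      let r' := r % f'
      unrankLoop fuel (pool.take i ++ pool.drop (i+1)) r' (w ++ pool.getD i "") f'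

def substring_movement_alt (pwds : List String) : List String :=
  match PySem.List.pyGet? pwds 0 with
  | none => []   -- pwds[0] raises IndexError: excluded by Pre_
  | some s =>
    let groups := (runsB s.toList).map String.ofList
    -- total = factorial(len(groups)) built by B's 'for k in range(2, n+1): total *= k'
    let total := (List.range' 2 (groups.length - 1)).foldl (fun t k => t * k) 1
    (List.range (min 10 total)).map (fun rank => unrankLoop groups.length groups rank "" total)

-- ===== PRECONDITION & SPEC =====
-- Pre_ excludes only the empty list, on which A (and B) raise IndexError at pwds[0].
def Pre_substring_movement (pwds : List String) : Prop := pwds ≠ []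
instance (pwds : List String) : Decidable (Pre_substring_movement pwds) := by
  unfold Pre_substring_movement; infer_instance

def pvWitness_substring_movement : List String := ["aB1!c"]

def Spec_substring_movement (pwds : List String) (out : List String) : Prop := out = substring_movement_alt pwds
instance (pwds : List String) (out : List String) : Decidable (Spec_substring_movement pwds out) := by unfold Spec_substring_movement; infer_instance

-- ===== CLAIM (what is proved, stated in full; the proofs are below) =====
def Claim_equal_substring_movement : Prop := ∀ (pwds : List String), Dom_substring_movement pwds → Pre_substring_movement pwds → Spec_substring_movement pwds (substring_movement pwds)

-- ===== LEMMAS AND PROOFS =====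

-- all permutations in itertools order (proof-only reference object)
def permsFull {α : Type} [Inhabited α] : Nat → List α → List (List α)
  | 0, _ => [[]]
  | fuel+1, xs =>
    (List.range xs.length).foldl
      (fun acc i =>
        acc ++ (permsFull fuel (xs.take i ++ xs.drop (i+1))).map
               (fun p => xs.getD i default :: p)) []

lemma take_length_takeWhile (p : Char → Bool) (cs : List Char) :
    cs.take (cs.takeWhile p).length = cs.takeWhile p := by
  induction cs with
  | nil => rfl
  | cons c t ih => by_cases h : p c <;> simp [h, ih]

lemma drop_length_takeWhile (p : Char → Bool) (cs : List Char) :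
    cs.drop (cs.takeWhile p).length = cs.dropWhile p := by
  induction cs with
  | nil => rfl
  | cons c t ih => by_cases h : p c <;> simp [h, ih]

lemma runsB_cons (c : Char) (cs : List Char) :
    runsB (c :: cs)
      = (c :: cs.takeWhile (fun d => pyClassify d == pyClassify c)) ::
          runsB (cs.dropWhile (fun d => pyClassify d == pyClassify c)) := by
  rw [runsB]
  rw [Nat.add_comm 1]
  simp only [List.take_succ_cons, List.drop_succ_cons,
    take_length_takeWhile, drop_length_takeWhile]

lemma foldl_cap_take {α β : Type} (k : Nat) (g : Nat → β → List α) (G : β → List α)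
    (hg : ∀ j b, g j b = (G b).take j) :
    ∀ (l : List β) (A : List α),
      l.foldl (fun acc b => if k ≤ acc.length then acc else acc ++ g (k - acc.length) b) (A.take k)
        = (l.foldl (fun acc b => acc ++ G b) A).take k := by
  intro l
  induction l with
  | nil => intro A; simp
  | cons b t ih =>
    intro A
    simp only [List.foldl_cons]
    by_cases h : k ≤ (A.take k).length
    · have hk : k ≤ A.length := by simpa using h
      rw [if_pos h]
      have h1 : (A ++ G b).take k = A.take k := List.take_append_of_le_length hk
      rw [show A.take k = (A ++ G b).take k from h1.symm, ih (A ++ G b)]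
    · have hk : A.length < k := by
        by_contra hc
        exact h (by simp [List.length_take]; omega)
      rw [if_neg h]
      have hA : A.take k = A := List.take_of_length_le (le_of_lt hk)
      have h2 : A.take k ++ g (k - (A.take k).length) b = (A ++ G b).take k := by
        rw [hA, hg, List.take_append]
        congr 1
        exact (List.take_of_length_le (le_of_lt hk)).symm
      rw [h2, ih (A ++ G b)]

lemma permsTakeAux_eq_take {α : Type} [Inhabited α] :
    ∀ (fuel k : Nat) (xs : List α),
      permsTakeAux fuel k xs = (permsFull fuel xs).take k := by
  intro fuel
  induction fuel with
  | zero =>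
    intro k xs
    cases k with
    | zero => simp [permsTakeAux, permsFull]
    | succ k => simp [permsTakeAux, permsFull]
  | succ fuel ih =>
    intro k xs
    cases k with
    | zero => simp [permsTakeAux]
    | succ k =>
      have := foldl_cap_take (α := List α) (β := Nat) (k+1)
        (fun j i => (permsTakeAux fuel j (xs.take i ++ xs.drop (i+1))).map
               (fun p => xs.getD i default :: p))
        (fun i => (permsFull fuel (xs.take i ++ xs.drop (i+1))).map
               (fun p => xs.getD i default :: p))
        (fun j b => by simp only []; rw [ih, List.map_take])
        (List.range xs.length) []
      simpa [permsTakeAux, permsFull] using this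

-- A's counter-and-break loop yields the first 10 joined permutations
lemma foldl_cnt :
    ∀ (l : List (List String)) (c : Nat) (out : List String),
      (l.foldl (fun (st : Nat × List String) p =>
          let ns := PySem.Str.join "" p
          let cnt := st.1 + 1
          if cnt > 10 then (cnt, st.2) else (cnt, st.2 ++ [ns])) (c, out)).2
        = out ++ (l.map (fun p => PySem.Str.join "" p)).take (10 - c) := by
  intro l
  induction l with
  | nil => intro c out; simp
  | cons p t ih =>
    intro c out
    simp only [List.foldl_cons, List.map_cons]
    by_cases h : c + 1 > 10
    · rw [if_pos h, ih]
      have h0 : 10 - c = 0 := by omega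
      have h1 : 10 - (c+1) = 0 := by omega
      simp [h0, h1]
    · rw [if_neg h, ih]
      have h1 : 10 - c = (10 - (c+1)) + 1 := by omega
      rw [h1, List.take_succ_cons]
      simp

-- A's state machine, started inside a run, produces exactly the class runs
lemma fold_run :
    ∀ (rest : List Char) (res : List (List Char)) (t : Nat) (cw : List Char), cw ≠ [] →
      (let st := rest.foldl dasStep (res, some t, cw)
       if st.2.2 ≠ [] then st.1 ++ [st.2.2] else st.1)
        = res ++ (cw ++ rest.takeWhile (fun d => pyClassify d == t)) ::
            runsB (rest.dropWhile (fun d => pyClassify d == t)) := by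
  intro rest
  induction rest with
  | nil => intro res t cw hcw; simp [runsB, hcw]
  | cons c cs ih =>
    intro res t cw hcw
    by_cases h : pyClassify c = t
    · have hstep : dasStep (res, some t, cw) c = (res, some t, cw ++ [c]) := by
        simp [dasStep, h]
      simp only [List.foldl_cons, hstep]
      rw [ih res t (cw ++ [c]) (by simp)]
      simp [h, List.append_assoc]
    · have hstep : dasStep (res, some t, cw) c =
          (res ++ [cw], some (pyClassify c), [c]) := by
        simp [dasStep, h, hcw]
      simp only [List.foldl_cons, hstep]
      rw [ih (res ++ [cw]) (pyClassify c) [c] (by simp)]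
      have hne : (pyClassify c == t) = false := by simp [h]
      simp only [List.takeWhile_cons, List.dropWhile_cons, hne, Bool.false_eq_true, if_false]
      rw [runsB_cons]
      simp [List.append_assoc]

lemma split_eq (s : String) :
    split_string_by_type s = (runsB s.toList).map String.ofList := by
  unfold split_string_by_type
  cases hs : s.toList with
  | nil => simp [runsB]
  | cons c cs =>
    have hstep : dasStep ([], none, []) c = ([], some (pyClassify c), [c]) := by
      simp [dasStep]
    simp only [List.foldl_cons, hstep]
    rw [fold_run cs [] (pyClassify c) [c] (by simp)]
    rw [runsB_cons]
    simp

-- "".join: peeling one string off the front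
lemma chars_join_nil_cons (x : List Char) (m : List (List Char)) :
    PySem.Chars.join [] (x :: m) = x ++ PySem.Chars.join [] m := by
  cases m with
  | nil => simp [PySem.Chars.join_singleton, PySem.Chars.join_nil]
  | cons b t => simpa using PySem.Chars.join_cons_cons ([] : List Char) x b t

lemma str_join_nil_cons (a : String) (l : List String) :
    PySem.Str.join "" (a :: l) = a ++ PySem.Str.join "" l := by
  simp only [PySem.Str.join, List.map_cons, show ("":String).toList = [] from rfl,
    chars_join_nil_cons, String.ofList_append, String.ofList_toList]

lemma permsFull_flatMap {α : Type} [Inhabited α] (fuel : Nat) (xs : List α) :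
    permsFull (fuel+1) xs
      = (List.range xs.length).flatMap
          (fun i => (permsFull fuel (xs.take i ++ xs.drop (i+1))).map
               (fun p => xs.getD i default :: p)) := by
  rw [permsFull, ← List.flatMap_eq_foldl]

lemma permsFull_length {α : Type} [Inhabited α] :
    ∀ (n : Nat) (xs : List α), xs.length = n → (permsFull n xs).length = n.factorial := by
  intro n
  induction n with
  | zero => intro xs h; simp [permsFull]
  | succ n ih =>
    intro xs h
    rw [permsFull_flatMap, List.length_flatMap]
    have hmap : ∀ i ∈ List.range xs.length,
        ((permsFull n (xs.take i ++ xs.drop (i+1))).map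
            (fun p => xs.getD i default :: p)).length = n.factorial := by
      intro i hi
      rw [List.length_map]
      apply ih
      rw [List.length_append, List.length_take, List.length_drop]
      have := List.mem_range.mp hi
      omega
    calc ((List.range xs.length).map fun i =>
            ((permsFull n (xs.take i ++ xs.drop (i+1))).map
              (fun p => xs.getD i default :: p)).length).sum
        = ((List.range xs.length).map fun _ => n.factorial).sum := by
          exact congrArg List.sum (List.map_congr_left hmap)
      _ = (n+1).factorial := by
          rw [PySem.List.sum_map_const_nat, List.length_range, h, Nat.factorial_succ]

lemma getD_flatMap_const {α : Type} (g : Nat → List α) (f : Nat) (hf : 0 < f) (d : α) :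
    ∀ (l : List Nat) (r : Nat), (∀ x ∈ l, (g x).length = f) → r < l.length * f →
      (l.flatMap g).getD r d = (g (l.getD (r / f) 0)).getD (r % f) d := by
  intro l
  induction l with
  | nil => intro r _ hr; simp at hr
  | cons x t ih =>
    intro r hlen hr
    rw [List.flatMap_cons]
    by_cases h : r < f
    · rw [List.getD_append _ _ _ _ (by rw [hlen x (by simp)]; exact h),
        Nat.div_eq_of_lt h, Nat.mod_eq_of_lt h]
      simp
    · push_neg at h
      rw [List.getD_append_right _ _ _ _ (by rw [hlen x (by simp)]; exact h), hlen x (by simp)]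
      rw [List.length_cons, Nat.succ_mul] at hr
      rw [ih (r - f) (fun y hy => hlen y (by simp [hy])) (by omega)]
      have e1 : r / f = (r - f) / f + 1 := Nat.div_eq_sub_div hf h
      have hm : (r - f) % f = r % f := (Nat.mod_eq_sub_mod h).symm
      rw [e1, hm, List.getD_cons_succ]

-- indexing the permutation list: block r/n!, offset r%n!
lemma permsFull_getD {α : Type} [Inhabited α] (n : Nat) (xs : List α)
    (h : xs.length = n+1) (r : Nat) (hr : r < (n+1).factorial) :
    (permsFull (n+1) xs).getD r []
      = xs.getD (r / n.factorial) default ::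
          (permsFull n (xs.take (r / n.factorial) ++ xs.drop (r / n.factorial + 1))).getD
            (r % n.factorial) [] := by
  have hf : 0 < n.factorial := Nat.factorial_pos n
  have hrange : ∀ i ∈ List.range xs.length,
      ((permsFull n (xs.take i ++ xs.drop (i+1))).map
          (fun p => xs.getD i default :: p)).length = n.factorial := by
    intro i hi
    rw [List.length_map]
    apply permsFull_length
    rw [List.length_append, List.length_take, List.length_drop]
    have := List.mem_range.mp hi
    omega
  have hrn : r < (List.range xs.length).length * n.factorial := by
    rw [List.length_range, h]
    calc r < (n+1).factorial := hr
      _ = (n+1) * n.factorial := Nat.factorial_succ n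
  rw [permsFull_flatMap, getD_flatMap_const _ n.factorial hf [] _ r hrange hrn]
  have hi : r / n.factorial < n + 1 := by
    apply Nat.div_lt_of_lt_mul
    calc r < (n+1).factorial := hr
      _ = n.factorial * (n+1) := by rw [Nat.factorial_succ]; ring
  have hgetd : (List.range xs.length).getD (r / n.factorial) 0 = r / n.factorial := by
    rw [List.getD_eq_getElem _ _ (by rw [List.length_range, h]; exact hi), List.getElem_range]
  rw [hgetd]
  have hlen : (permsFull n (xs.take (r / n.factorial) ++ xs.drop (r / n.factorial + 1))).length
      = n.factorial := by
    apply permsFull_length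
    rw [List.length_append, List.length_take, List.length_drop]
    omega
  have hmod : r % n.factorial < n.factorial := Nat.mod_lt _ hf
  rw [List.getD_eq_getElem
      ((permsFull n (xs.take (r / n.factorial) ++ xs.drop (r / n.factorial + 1))).map
        (fun p => xs.getD (r / n.factorial) default :: p)) _
      (by rw [List.length_map, hlen]; exact hmod),
    List.getElem_map]
  congr 1
  exact (List.getD_eq_getElem _ _ (by rw [hlen]; exact hmod)).symm

-- B's while loop unranks: it builds exactly permutation number r (itertools order)
lemma unrank_correct :
    ∀ (n : Nat) (pool : List String), pool.length = n →
      ∀ (r : Nat) (w : String), r < n.factorial →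
        unrankLoop n pool r w n.factorial
          = w ++ PySem.Str.join "" ((permsFull n pool).getD r []) := by
  intro n
  induction n with
  | zero =>
    intro pool hlen r w hr
    interval_cases r
    rw [List.length_eq_zero_iff.mp hlen]
    simp [unrankLoop, permsFull, PySem.Str.join, PySem.Chars.join_nil]
  | succ n ih =>
    intro pool hlen r w hr
    obtain ⟨x, xs, rfl⟩ : ∃ x xs, pool = x :: xs := by
      cases pool with
      | nil => simp at hlen
      | cons x xs => exact ⟨x, xs, rfl⟩
    have hf : 0 < n.factorial := Nat.factorial_pos n
    have hdiv : (n+1).factorial / (x :: xs).length = n.factorial := by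
      rw [hlen, Nat.factorial_succ, Nat.mul_div_cancel_left _ (Nat.succ_pos n)]
    rw [unrankLoop]
    simp only [hdiv]
    have hi : r / n.factorial < n + 1 := by
      apply Nat.div_lt_of_lt_mul
      calc r < (n+1).factorial := hr
        _ = n.factorial * (n+1) := by rw [Nat.factorial_succ]; ring
    have hlen' : ((x :: xs).take (r / n.factorial) ++ (x :: xs).drop (r / n.factorial + 1)).length = n := by
      rw [List.length_append, List.length_take, List.length_drop]
      omega
    rw [ih _ hlen' _ _ (Nat.mod_lt _ hf)]
    rw [permsFull_getD n (x :: xs) hlen r hr, str_join_nil_cons]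
    rw [show (default : String) = "" from rfl, String.append_assoc]

-- B's 'for k in range(2, n+1): total *= k' computes the factorial
lemma factFold : ∀ (m : Nat), (List.range' 2 m).foldl (fun t k => t * k) 1 = (m+1).factorial := by
  intro m
  induction m with
  | zero => simp [Nat.factorial]
  | succ m ih =>
    rw [List.range'_1_concat, List.foldl_append, ih]
    simp [Nat.factorial_succ]
    ring

lemma take_eq_map_range {α : Type} (l : List α) (k : Nat) (d : α) :
    l.take k = (List.range (min k l.length)).map (fun i => l.getD i d) := by
  apply List.ext_getElem
  · simp
  · intro j h1 h2
    simp only [List.length_take] at h1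
    rw [List.getElem_take, List.getElem_map, List.getElem_range,
      List.getD_eq_getElem _ _ (by omega)]

-- ===== VERDICT (by name: the statement is the Claim_ definition above) =====
theorem substring_movement_spec : Claim_equal_substring_movement := by
  intro pwds _ hpre
  unfold Spec_substring_movement
  cases pwds with
  | nil => exact absurd rfl hpre
  | cons p ps =>
    unfold substring_movement substring_movement_alt
    rw [PySem.List.pyGet?_zero_cons]
    simp only [split_eq]
    set groups := (runsB p.toList).map String.ofList with hg
    set n := groups.length with hn
    have htot : (List.range' 2 (n - 1)).foldl (fun t k => t * k) 1 = n.factorial := by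
      cases hcase : n with
      | zero => simp [Nat.factorial]
      | succ m => rw [Nat.succ_sub_one, factFold]
    rw [htot, foldl_cnt, permsTakeAux_eq_take]
    have hL : ((permsFull n groups).map (fun p => PySem.Str.join "" p)).length = n.factorial := by
      rw [List.length_map, permsFull_length n groups rfl]
    rw [List.map_take, Nat.sub_zero, List.take_take, List.nil_append,
      show min 10 11 = 10 from rfl,
      take_eq_map_range _ 10 "", hL]
    apply List.map_congr_left
    intro r hr
    have hrf : r < n.factorial := by
      have := List.mem_range.mp hr
      omega
    rw [unrank_correct n groups rfl r "" hrf, String.empty_append,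
      List.getD_eq_getElem _ _ (by rw [List.length_map, permsFull_length n groups rfl]; exact hrf),
      List.getElem_map,
      List.getD_eq_getElem _ _ (by rw [permsFull_length n groups rfl]; exact hrf)]
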